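-- pv_equiv track=rewrite | github.com/DotVentu/Piton | Met/cuadratica.py | calcular_regresion_cuadratica
-- ===== SOURCE A (Python) =====
-- def calcular_regresion_cuadratica(x, y):
--     n = len(x)
--     sum_x = sum(x)
--     sum_y = sum(y)
--     sum_x2 = sum([xi**2 for xi in x])
--     sum_x3 = sum([xi**3 for xi in x])
--     sum_x4 = sum([xi**4 for xi in x])
--     sum_xy = sum([x[i] * y[i] for i in range(n)])
--     sum_x2y = sum([x[i]**2 * y[i] for i in range(n)])
--
--     matriz = [
--         [n, sum_x, sum_x2],
--         [sum_x, sum_x2, sum_x3],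
--         [sum_x2, sum_x3, sum_x4]
--     ]
--
--     resultados = [sum_y, sum_xy, sum_x2y]
--
--     return matriz, resultados
-- ===== SOURCE B (Python) =====
-- def calcular_regresion_cuadratica(x, y):
--     sum_x = sum_x2 = sum_x3 = sum_x4 = sum_xy = sum_x2y = 0
--     for xi, yi in zip(x, y):
--         xi2 = xi * xi
--         sum_x += xi
--         sum_x2 += xi2
--         sum_x3 += xi2 * xi
--         sum_x4 += xi2 * xi2
--         sum_xy += xi * yi
--         sum_x2y += xi2 * yi
--     n = len(x)
--     sum_y = sum(y)
--     matriz = [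
--         [n, sum_x, sum_x2],
--         [sum_x, sum_x2, sum_x3],
--         [sum_x2, sum_x3, sum_x4],
--     ]
--     return matriz, [sum_y, sum_xy, sum_x2y]
-- ===== Notes on version B (the rewrite author's own statement) =====
-- stated objective: alternative
-- what changed: Replaced A's seven separate passes (sum and five list comprehensions, two of them re-indexing x and y) with one fused loop over zip(x,y) that keeps six running accumulators and reuses xi*xi for the higher powers and cross terms.
import Mathlib
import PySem

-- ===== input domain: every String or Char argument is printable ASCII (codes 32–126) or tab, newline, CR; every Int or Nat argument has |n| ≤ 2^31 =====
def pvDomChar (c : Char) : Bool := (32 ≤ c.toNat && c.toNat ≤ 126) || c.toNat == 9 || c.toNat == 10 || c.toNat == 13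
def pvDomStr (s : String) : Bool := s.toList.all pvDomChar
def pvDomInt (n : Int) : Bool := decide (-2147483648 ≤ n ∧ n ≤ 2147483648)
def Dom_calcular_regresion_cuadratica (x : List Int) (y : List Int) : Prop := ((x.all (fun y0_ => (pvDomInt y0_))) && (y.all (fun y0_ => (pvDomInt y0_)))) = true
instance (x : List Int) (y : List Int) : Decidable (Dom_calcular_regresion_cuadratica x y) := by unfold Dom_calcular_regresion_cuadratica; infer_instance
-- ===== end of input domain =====

-- B fuses A's seven separate summation passes into a single loop over zip(x,y) with six accumulators.


-- ===== PORT A =====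
-- literal port of A; the indexed accesses x[i], y[i] are rendered with getD 0, which is
-- exact on Pre_ (there every index i < len(x) ≤ len(y) is in range; Python raises otherwise).
def calcular_regresion_cuadratica (x : List Int) (y : List Int) : List (List Int) × List Int :=
  let n : Int := x.length
  let sum_x := List.foldl (· + ·) 0 x
  let sum_y := List.foldl (· + ·) 0 y
  let sum_x2 := List.foldl (· + ·) 0 (x.map (fun xi => xi ^ 2))
  let sum_x3 := List.foldl (· + ·) 0 (x.map (fun xi => xi ^ 3))
  let sum_x4 := List.foldl (· + ·) 0 (x.map (fun xi => xi ^ 4))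
  let sum_xy := List.foldl (· + ·) 0 ((List.range x.length).map (fun i => x.getD i 0 * y.getD i 0))
  let sum_x2y := List.foldl (· + ·) 0 ((List.range x.length).map (fun i => (x.getD i 0) ^ 2 * y.getD i 0))
  ([[n, sum_x, sum_x2], [sum_x, sum_x2, sum_x3], [sum_x2, sum_x3, sum_x4]],
   [sum_y, sum_xy, sum_x2y])

-- ===== PORT B =====
-- one fused step of B's loop: accumulators (sum_x, sum_x2, sum_x3, sum_x4, sum_xy, sum_x2y)
def fusedStep (acc : Int × Int × Int × Int × Int × Int) (p : Int × Int) :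
    Int × Int × Int × Int × Int × Int :=
  let xi := p.1
  let yi := p.2
  let xi2 := xi * xi
  (acc.1 + xi, acc.2.1 + xi2, acc.2.2.1 + xi2 * xi, acc.2.2.2.1 + xi2 * xi2,
   acc.2.2.2.2.1 + xi * yi, acc.2.2.2.2.2 + xi2 * yi)

def calcular_regresion_cuadratica_alt (x : List Int) (y : List Int) : List (List Int) × List Int :=
  let s := List.foldl fusedStep (0, 0, 0, 0, 0, 0) (x.zip y)
  let n : Int := x.length
  let sum_y := List.foldl (· + ·) 0 y
  ([[n, s.1, s.2.1], [s.1, s.2.1, s.2.2.1], [s.2.1, s.2.2.1, s.2.2.2.1]],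
   [sum_y, s.2.2.2.2.1, s.2.2.2.2.2])

-- ===== PRECONDITION & SPEC =====
-- Pre_ excludes exactly the inputs where A raises IndexError: y shorter than x.
def Pre_calcular_regresion_cuadratica (x : List Int) (y : List Int) : Prop := x.length ≤ y.length
instance (x : List Int) (y : List Int) : Decidable (Pre_calcular_regresion_cuadratica x y) := by
  unfold Pre_calcular_regresion_cuadratica; infer_instance

def pvWitness_calcular_regresion_cuadratica : List Int × List Int := ([1, 2, 3], [2, 5, 10])

def Spec_calcular_regresion_cuadratica (x : List Int) (y : List Int) (out : List (List Int) × List Int) : Prop := out = calcular_regresion_cuadratica_alt x y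
instance (x : List Int) (y : List Int) (out : List (List Int) × List Int) : Decidable (Spec_calcular_regresion_cuadratica x y out) := by unfold Spec_calcular_regresion_cuadratica; infer_instance

-- ===== CLAIM (what is proved, stated in full; the proofs are below) =====
def Claim_equal_calcular_regresion_cuadratica : Prop := ∀ (x : List Int) (y : List Int), Dom_calcular_regresion_cuadratica x y → Pre_calcular_regresion_cuadratica x y → Spec_calcular_regresion_cuadratica x y (calcular_regresion_cuadratica x y)

-- ===== LEMMAS AND PROOFS =====

-- B's fused fold computes the six component sums at once.
theorem fused_foldl (l : List (Int × Int)) (a b c d e f : Int) :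
    List.foldl fusedStep (a, b, c, d, e, f) l =
      (a + (l.map (fun p => p.1)).sum,
       b + (l.map (fun p => p.1 * p.1)).sum,
       c + (l.map (fun p => p.1 * p.1 * p.1)).sum,
       d + (l.map (fun p => (p.1 * p.1) * (p.1 * p.1))).sum,
       e + (l.map (fun p => p.1 * p.2)).sum,
       f + (l.map (fun p => p.1 * p.1 * p.2)).sum) := by
  induction l generalizing a b c d e f with
  | nil => simp
  | cons hd tl ih =>
      simp [fusedStep, ih]
      refine ⟨by ring, by ring, by ring, by ring, by ring, by ring⟩

-- A's index-based comprehension equals the map over the zipped list (when x is no longer than y).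
theorem range_map_eq_zip_map (g : Int → Int → Int) :
    ∀ (x y : List Int), x.length ≤ y.length →
      (List.range x.length).map (fun i => g (x.getD i 0) (y.getD i 0)) =
        (x.zip y).map (fun p => g p.1 p.2) := by
  intro x
  induction x with
  | nil => intro y _; simp
  | cons hx tx ih =>
      intro y hlen
      cases y with
      | nil => simp at hlen
      | cons hy ty =>
          simp only [List.length_cons, List.range_succ_eq_map, List.map_cons, List.map_map,
            List.zip_cons_cons]
          rw [List.cons.injEq]
          refine ⟨rfl, ?_⟩
          have hmap : List.map ((fun i => g ((hx :: tx).getD i 0) ((hy :: ty).getD i 0)) ∘ Nat.succ)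
              (List.range tx.length) =
              List.map (fun i => g (tx.getD i 0) (ty.getD i 0)) (List.range tx.length) := by
            apply List.map_congr_left; intro i _; simp
          rw [hmap, ih ty (by simpa using hlen)]

theorem foldl_add_eq_sum (l : List Int) : List.foldl (· + ·) 0 l = l.sum :=
  List.sum_eq_foldl.symm

-- ===== VERDICT (by name: the statement is the Claim_ definition above) =====
theorem calcular_regresion_cuadratica_spec : Claim_equal_calcular_regresion_cuadratica := by
  intro x y _ hpre
  unfold Spec_calcular_regresion_cuadratica calcular_regresion_cuadratica calcular_regresion_cuadratica_alt
  have hpre' : x.length ≤ y.length := hpre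
  simp only [fused_foldl, foldl_add_eq_sum,
    range_map_eq_zip_map (fun a b => a * b) x y hpre',
    range_map_eq_zip_map (fun a b => a ^ 2 * b) x y hpre',
    zero_add]
  have hfst : (x.zip y).map Prod.fst = x := List.map_fst_zip hpre'
  have h1 : (x.zip y).map (fun p => p.1) = x := hfst
  have h2 : (x.zip y).map (fun p => p.1 * p.1) = x.map (fun xi => xi ^ 2) := by
    conv_rhs => rw [← hfst, List.map_map]
    apply List.map_congr_left; intro p _; simp [pow_two]
  have h3 : (x.zip y).map (fun p => p.1 * p.1 * p.1) = x.map (fun xi => xi ^ 3) := by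
    conv_rhs => rw [← hfst, List.map_map]
    apply List.map_congr_left; intro p _; simp only [Function.comp_apply]; ring
  have h4 : (x.zip y).map (fun p => (p.1 * p.1) * (p.1 * p.1)) = x.map (fun xi => xi ^ 4) := by
    conv_rhs => rw [← hfst, List.map_map]
    apply List.map_congr_left; intro p _; simp only [Function.comp_apply]; ring
  have h5 : (x.zip y).map (fun p => p.1 * p.1 * p.2) = (x.zip y).map (fun p => p.1 ^ 2 * p.2) := by
    apply List.map_congr_left; intro p _; ring
  rw [h1, h2, h3, h4, h5]
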